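-- pv_equiv track=rewrite | github.com/Yaaasminnn/Link-Engine | src/pokemon_link_engine/utils/pygame_utils.py | func
-- ===== SOURCE A (Python) =====
-- def func(inputs, rects, col_tol=1):
--     """rename this"""
--     x, y = inputs
--     for rect in rects:
--         if rect[0] <= col_tol:
--             if x<0: x=0
--         if rect[1] <= col_tol:
--             if x>0: x=0
--         if rect[2] <= col_tol:
--             if y<0: y=0
--         if rect[3] <= col_tol:
--             if y>0: y=0
--
--     return [x,y]
-- ===== SOURCE B (Python) =====
-- def func(inputs, rects, col_tol=1):
--     """Two-phase rewrite: gather the four edge predicates over all rects once,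
--     then apply the clamp to each coordinate a single time."""
--     x, y = inputs
--     left = any(r[0] <= col_tol for r in rects)
--     right = any(r[1] <= col_tol for r in rects)
--     top = any(r[2] <= col_tol for r in rects)
--     bottom = any(r[3] <= col_tol for r in rects)
--     if x < 0 and left:
--         x = 0
--     elif x > 0 and right:
--         x = 0
--     if y < 0 and top:
--         y = 0
--     elif y > 0 and bottom:
--         y = 0
--     return [x, y]
-- ===== Notes on version B (the rewrite author's own statement) =====
-- stated objective: simpler
-- what changed: Replaces the per-rect interleaved clamping loop (which rewrites x and y inside every iteration) by one pass gathering four edge booleans with any() followed by a single clamp of each coordinate.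
import Mathlib
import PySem

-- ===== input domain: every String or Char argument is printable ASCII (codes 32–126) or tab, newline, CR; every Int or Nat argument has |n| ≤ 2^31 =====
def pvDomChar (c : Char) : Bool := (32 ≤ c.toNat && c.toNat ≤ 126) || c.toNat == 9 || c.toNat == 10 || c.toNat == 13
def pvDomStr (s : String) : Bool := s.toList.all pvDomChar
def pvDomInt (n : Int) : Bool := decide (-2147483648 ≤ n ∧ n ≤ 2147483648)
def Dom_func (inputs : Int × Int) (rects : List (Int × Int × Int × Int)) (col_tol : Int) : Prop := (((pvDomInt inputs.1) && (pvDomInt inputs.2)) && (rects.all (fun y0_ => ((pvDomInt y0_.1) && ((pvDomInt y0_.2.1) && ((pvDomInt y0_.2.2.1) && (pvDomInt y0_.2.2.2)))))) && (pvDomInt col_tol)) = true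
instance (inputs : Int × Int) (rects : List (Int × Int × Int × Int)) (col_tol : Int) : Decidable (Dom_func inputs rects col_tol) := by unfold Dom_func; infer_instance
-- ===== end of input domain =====

-- B replaces A's interleaved per-rect clamping loop by an any()-predicate pass plus a single clamp (objective: simpler).

-- ===== PORT A =====
-- literal transliteration: the for-loop is a foldl carrying (x, y), the four ifs in order
def func (inputs : Int × Int) (rects : List (Int × Int × Int × Int)) (col_tol : Int) : List Int :=
  let p := rects.foldl (fun (s : Int × Int) rect =>
    let x := s.1
    let y := s.2
    let x := if rect.1 ≤ col_tol then (if x < 0 then 0 else x) else x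
    let x := if rect.2.1 ≤ col_tol then (if x > 0 then 0 else x) else x
    let y := if rect.2.2.1 ≤ col_tol then (if y < 0 then 0 else y) else y
    let y := if rect.2.2.2 ≤ col_tol then (if y > 0 then 0 else y) else y
    (x, y)) inputs
  [p.1, p.2]

-- ===== PORT B =====
def func_alt (inputs : Int × Int) (rects : List (Int × Int × Int × Int)) (col_tol : Int) : List Int :=
  let left := rects.any (fun r => r.1 ≤ col_tol)
  let right := rects.any (fun r => r.2.1 ≤ col_tol)
  let top := rects.any (fun r => r.2.2.1 ≤ col_tol)
  let bottom := rects.any (fun r => r.2.2.2 ≤ col_tol)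
  let x := if inputs.1 < 0 ∧ left = true then 0
           else if inputs.1 > 0 ∧ right = true then 0 else inputs.1
  let y := if inputs.2 < 0 ∧ top = true then 0
           else if inputs.2 > 0 ∧ bottom = true then 0 else inputs.2
  [x, y]

-- ===== PRECONDITION & SPEC =====
def Spec_func (inputs : Int × Int) (rects : List (Int × Int × Int × Int)) (col_tol : Int) (out : List Int) : Prop := out = func_alt inputs rects col_tol
instance (inputs : Int × Int) (rects : List (Int × Int × Int × Int)) (col_tol : Int) (out : List Int) : Decidable (Spec_func inputs rects col_tol out) := by unfold Spec_func; infer_instance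

-- ===== CLAIM (what is proved, stated in full; the proofs are below) =====
def Claim_equal_func : Prop := ∀ (inputs : Int × Int) (rects : List (Int × Int × Int × Int)) (col_tol : Int), Dom_func inputs rects col_tol → Spec_func inputs rects col_tol (func inputs rects col_tol)

-- ===== LEMMAS AND PROOFS =====

-- B's one-shot clamp of a single coordinate
def pvClamp (v : Int) (l r : Bool) : Int :=
  if v < 0 ∧ l = true then 0 else if v > 0 ∧ r = true then 0 else v

-- composing A's per-rect update of one coordinate with a later clamp = one clamp with or-ed flags
theorem pvClamp_comp (x : Int) (p q : Prop) [Decidable p] [Decidable q] (l r : Bool) :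
    pvClamp (if q then (if (if p then (if x < 0 then 0 else x) else x) > 0 then 0 else (if p then (if x < 0 then 0 else x) else x)) else (if p then (if x < 0 then 0 else x) else x)) l r
      = pvClamp x (decide p || l) (decide q || r) := by
  unfold pvClamp
  cases l <;> cases r <;> by_cases hp : p <;> by_cases hq : q <;>
    simp only [hp, hq, if_pos, if_neg, not_false_iff, decide_true, decide_false,
      Bool.true_or, Bool.false_or, Bool.or_true, Bool.or_false, and_true, and_false,
      if_false, if_true] <;>
    first
      | omega
      | (split_ifs <;> omega)

-- the loop invariant: folding A's step equals clamping once with the anys of the remaining rects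
theorem pvFold_eq (col_tol : Int) :
    ∀ (rects : List (Int × Int × Int × Int)) (x y : Int),
      rects.foldl (fun (s : Int × Int) rect =>
        let x := s.1
        let y := s.2
        let x := if rect.1 ≤ col_tol then (if x < 0 then 0 else x) else x
        let x := if rect.2.1 ≤ col_tol then (if x > 0 then 0 else x) else x
        let y := if rect.2.2.1 ≤ col_tol then (if y < 0 then 0 else y) else y
        let y := if rect.2.2.2 ≤ col_tol then (if y > 0 then 0 else y) else y
        (x, y)) (x, y)
      = (pvClamp x (rects.any (fun r => r.1 ≤ col_tol)) (rects.any (fun r => r.2.1 ≤ col_tol)),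
         pvClamp y (rects.any (fun r => r.2.2.1 ≤ col_tol)) (rects.any (fun r => r.2.2.2 ≤ col_tol))) := by
  intro rects
  induction rects with
  | nil =>
      intro x y
      simp [pvClamp]
  | cons r rs ih =>
      intro x y
      simp only [List.foldl_cons, List.any_cons, ih, Prod.mk.injEq]
      exact ⟨pvClamp_comp x _ _ _ _, pvClamp_comp y _ _ _ _⟩

theorem func_eq_alt (inputs : Int × Int) (rects : List (Int × Int × Int × Int)) (col_tol : Int) :
    func inputs rects col_tol = func_alt inputs rects col_tol := by
  obtain ⟨x, y⟩ := inputs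
  simp [func, func_alt, pvFold_eq col_tol rects x y, pvClamp]

-- ===== VERDICT (by name: the statement is the Claim_ definition above) =====
theorem func_spec : Claim_equal_func := by
  intro inputs rects col_tol _
  unfold Spec_func
  exact func_eq_alt inputs rects col_tol
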